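-- pv_equiv track=rewrite | github.com/Poiro-cat/pyprimality | primality_test/math_solve.py | Lucas_sequence
-- ===== SOURCE A (Python) =====
-- def Lucas_sequence(n:int,P:int,Q:int,N:int):
--     assert n >= 0, 'Sequence number n should be NO NEGATIVE'
--     assert N > 0, 'Modulo number N should be POSITIVE'
--     if n == 0: return 0,2
--     if n == 1: return 1,P
--     ops = []
--     while n > 1:
--         ops.append(n%2)
--         if n % 2 > 0: n -= 1
--         else: n //= 2
--     ops.reverse()
--     D,U,V = P*P-4*Q,1,P
--     for op in ops:
--         if op: U,V = P*U+V,D*U+P*V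
--         else: U,V = 2*U*V,D*U*U+V*V
--         U = (U+U%2*N)//2 % N
--         V = (V+V%2*N)//2 % N
--     return U,V
-- ===== SOURCE B (Python) =====
-- def Lucas_sequence(n: int, P: int, Q: int, N: int):
--     assert n >= 0, 'Sequence number n should be NO NEGATIVE'
--     assert N > 0, 'Modulo number N should be POSITIVE'
--     if n == 0: return 0, 2
--     D = P * P - 4 * Q
--
--     def half(x):
--         return (x + x % 2 * N) // 2 % N
--
--     def rec(m):
--         if m == 1:
--             return 1, P
--         if m % 2:
--             u, v = rec(m - 1)
--             u, v = P * u + v, D * u + P * v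
--         else:
--             u, v = rec(m // 2)
--             u, v = 2 * u * v, D * u * u + v * v
--         return half(u), half(v)
--
--     return rec(n)
-- ===== Notes on version B (the rewrite author's own statement) =====
-- stated objective: alternative
-- what changed: Replaced A's build-an-ops-list-then-replay structure by a direct top-down recursion on n (odd: add-one step on rec(n-1); even: doubling step on rec(n//2)), applying the same half-mod-N reduction after each step.
import Mathlib
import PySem

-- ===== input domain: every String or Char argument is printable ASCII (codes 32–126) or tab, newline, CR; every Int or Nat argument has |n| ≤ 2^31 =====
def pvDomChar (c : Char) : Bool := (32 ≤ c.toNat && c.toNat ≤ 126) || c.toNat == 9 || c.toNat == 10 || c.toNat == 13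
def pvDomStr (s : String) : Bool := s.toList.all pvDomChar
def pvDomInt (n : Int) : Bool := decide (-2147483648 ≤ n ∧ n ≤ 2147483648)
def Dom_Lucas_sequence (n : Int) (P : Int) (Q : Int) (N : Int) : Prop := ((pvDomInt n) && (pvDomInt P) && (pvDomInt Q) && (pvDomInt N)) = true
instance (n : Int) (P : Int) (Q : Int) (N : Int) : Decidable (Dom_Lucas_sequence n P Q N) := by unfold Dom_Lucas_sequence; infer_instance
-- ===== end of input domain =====

-- B replaces A's build-ops-list-then-replay loop by a direct top-down recursion on n (same per-step arithmetic); objective: alternative decomposition.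

-- ===== PORT A =====
-- the 'while n > 1' loop collecting ops (appends n%2; odd → n-1, even → n//2)
def pvOpsA (n : Int) (ops : List Int) : List Int :=
  if _h : n > 1 then
    let ops := ops ++ [PySem.Int.mod n 2]
    if PySem.Int.mod n 2 > 0 then pvOpsA (n - 1) ops
    else pvOpsA (PySem.Int.floordiv n 2) ops
  else ops
termination_by n.toNat
decreasing_by
  · simp [PySem.Int.mod] at *; omega
  · have : PySem.Int.floordiv n 2 = n / 2 := PySem.Int.floordiv_eq_ediv_of_pos (by omega)
    omega

-- the 'for op in ops' replay body of A
def pvStepA (P : Int) (D : Int) (N : Int) (UV : Int × Int) (op : Int) : Int × Int :=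
  let U := UV.1
  let V := UV.2
  let U' := if op ≠ 0 then P * U + V else 2 * U * V
  let V' := if op ≠ 0 then D * U + P * V else D * U * U + V * V
  let U'' := PySem.Int.mod (PySem.Int.floordiv (U' + PySem.Int.mod U' 2 * N) 2) N
  let V'' := PySem.Int.mod (PySem.Int.floordiv (V' + PySem.Int.mod V' 2 * N) 2) N
  (U'', V'')

def Lucas_sequence (n : Int) (P : Int) (Q : Int) (N : Int) : Int × Int :=
  -- asserts 'n ≥ 0' and 'N > 0' raise outside Pre_; below them A's code verbatim
  if n = 0 then (0, 2)
  else if n = 1 then (1, P)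
  else
    let ops := (pvOpsA n []).reverse
    let D := P * P - 4 * Q
    ops.foldl (pvStepA P D N) (1, P)

-- ===== PORT B =====
-- half x = (x + x%2*N)//2 % N
def pvHalfB (N : Int) (x : Int) : Int :=
  PySem.Int.mod (PySem.Int.floordiv (x + PySem.Int.mod x 2 * N) 2) N

-- rec m: base m==1 → (1,P); odd m: add-one step on rec (m-1); even m: doubling step on rec (m//2)
def pvRecB (P : Int) (D : Int) (N : Int) (m : Int) : Int × Int :=
  if _h : m ≤ 1 then (1, P)
  else if PySem.Int.mod m 2 ≠ 0 then
    let uv := pvRecB P D N (m - 1)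
    (pvHalfB N (P * uv.1 + uv.2), pvHalfB N (D * uv.1 + P * uv.2))
  else
    let uv := pvRecB P D N (PySem.Int.floordiv m 2)
    (pvHalfB N (2 * uv.1 * uv.2), pvHalfB N (D * uv.1 * uv.1 + uv.2 * uv.2))
termination_by m.toNat
decreasing_by
  · omega
  · have : PySem.Int.floordiv m 2 = m / 2 := PySem.Int.floordiv_eq_ediv_of_pos (by omega)
    omega

def Lucas_sequence_alt (n : Int) (P : Int) (Q : Int) (N : Int) : Int × Int :=
  if n = 0 then (0, 2)
  else pvRecB P (P * P - 4 * Q) N n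

-- ===== PRECONDITION & SPEC =====
-- Pre_ excludes exactly the inputs on which A's two asserts raise AssertionError (n < 0 or N ≤ 0).
def Pre_Lucas_sequence (n : Int) (P : Int) (Q : Int) (N : Int) : Prop := 0 ≤ n ∧ 0 < N
instance (n : Int) (P : Int) (Q : Int) (N : Int) : Decidable (Pre_Lucas_sequence n P Q N) := by
  unfold Pre_Lucas_sequence; infer_instance

def pvWitness_Lucas_sequence : Int × Int × Int × Int := (11, 3, -1, 7)

def Spec_Lucas_sequence (n : Int) (P : Int) (Q : Int) (N : Int) (out : Int × Int) : Prop := out = Lucas_sequence_alt n P Q N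
instance (n : Int) (P : Int) (Q : Int) (N : Int) (out : Int × Int) : Decidable (Spec_Lucas_sequence n P Q N out) := by unfold Spec_Lucas_sequence; infer_instance

-- ===== CLAIM (what is proved, stated in full; the proofs are below) =====
def Claim_equal_Lucas_sequence : Prop := ∀ (n : Int) (P : Int) (Q : Int) (N : Int), Dom_Lucas_sequence n P Q N → Pre_Lucas_sequence n P Q N → Spec_Lucas_sequence n P Q N (Lucas_sequence n P Q N)

-- ===== LEMMAS AND PROOFS =====

-- A's loop only appends to its accumulator
lemma pvOpsA_acc (k : Nat) : ∀ (n : Int), n.toNat ≤ k → ∀ ops, pvOpsA n ops = ops ++ pvOpsA n [] := by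
  induction k with
  | zero =>
      intro n hn ops
      rw [pvOpsA, pvOpsA]
      have h : ¬ n > 1 := by omega
      simp [dif_neg h]
  | succ k ih =>
      intro n hn ops
      rw [pvOpsA, pvOpsA]
      by_cases h : n > 1
      · simp only [dif_pos h]
        by_cases hm : PySem.Int.mod n 2 > 0
        · simp only [if_pos hm]
          have hb : (n - 1).toNat ≤ k := by omega
          rw [ih (n - 1) hb, ih (n - 1) hb ([] ++ [PySem.Int.mod n 2])]
          simp
        · simp only [if_neg hm]
          have hfd : PySem.Int.floordiv n 2 = n / 2 := PySem.Int.floordiv_eq_ediv_of_pos (by omega)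
          have hb : (PySem.Int.floordiv n 2).toNat ≤ k := by omega
          rw [ih _ hb, ih _ hb ([] ++ [PySem.Int.mod n 2])]
          simp
      · simp [dif_neg h]

-- replaying A's reversed ops list from (1,P) computes B's recursion
lemma replay_eq_rec (P D N : Int) : ∀ (n : Int), 1 ≤ n →
    ((pvOpsA n []).reverse.foldl (pvStepA P D N) (1, P)) = pvRecB P D N n := by
  intro n
  induction n using pvRecB.induct P D N with
  | case1 m h =>
      intro h1
      have : m = 1 := by omega
      subst this
      rw [pvOpsA, pvRecB]
      simp
  | case2 m h hm ih =>
      intro _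
      have hm2 : PySem.Int.mod m 2 > 0 := by
        have := PySem.Int.mod_two_eq m
        omega
      rw [pvOpsA, pvRecB]
      simp only [dif_pos (by omega : m > 1), if_pos hm2, dif_neg h, if_pos hm]
      rw [pvOpsA_acc (m - 1).toNat (m - 1) le_rfl]
      have h1 : (1 : Int) ≤ m - 1 := by omega
      simp only [List.reverse_append, List.nil_append, List.reverse_singleton,
        List.foldl_append, List.foldl_cons, List.foldl_nil]
      rw [ih h1]
      simp only [pvStepA, pvHalfB]
      rw [if_pos hm, if_pos hm]
  | case3 m h hm ih =>
      intro _
      have hm2 : ¬ PySem.Int.mod m 2 > 0 := by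
        have := PySem.Int.mod_two_eq m
        omega
      rw [pvOpsA, pvRecB]
      simp only [dif_pos (by omega : m > 1), if_neg hm2, dif_neg h, if_neg hm]
      rw [pvOpsA_acc (PySem.Int.floordiv m 2).toNat _ le_rfl]
      have hfd : PySem.Int.floordiv m 2 = m / 2 := PySem.Int.floordiv_eq_ediv_of_pos (by omega)
      have h1 : (1 : Int) ≤ PySem.Int.floordiv m 2 := by omega
      simp only [List.reverse_append, List.nil_append, List.reverse_singleton,
        List.foldl_append, List.foldl_cons, List.foldl_nil]
      rw [ih h1]
      simp only [pvStepA, pvHalfB]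
      rw [if_neg hm, if_neg hm]

-- ===== VERDICT (by name: the statement is the Claim_ definition above) =====
theorem Lucas_sequence_spec : Claim_equal_Lucas_sequence := by
  intro n P Q N _hdom hpre
  unfold Spec_Lucas_sequence Lucas_sequence Lucas_sequence_alt
  by_cases h0 : n = 0
  · simp [h0]
  · simp only [if_neg h0]
    by_cases h1 : n = 1
    · subst h1
      rw [pvRecB]
      simp
    · simp only [if_neg h1]
      exact replay_eq_rec P (P * P - 4 * Q) N n (by rcases hpre with ⟨hn, _⟩; omega)
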